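-- pv_equiv track=rewrite | github.com/lorkingcameron/Capstone_BCI-Bias-Research | src/bias_modification/reversal_word_augmentation.py | _join_with_sentence_formatting
-- ===== SOURCE A (Python) =====
-- def _join_with_sentence_formatting(tokens: list[str]):
--     """Join the tokens to form a sentence."""
--     updated_tokens = []
--     for i, token in enumerate(tokens):
--         if i>0 and token in [".", ",", "!", "?"]:
--             updated_tokens[-1] += token
--             continue
--
--         updated_tokens.append(token)
--
--     return " ".join(updated_tokens).replace(" - ", "-").capitalize()
-- ===== SOURCE B (Python) =====
-- def _join_with_sentence_formatting(tokens):
--     """Join the tokens to form a sentence (right-to-left pass with a pending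
--     punctuation suffix instead of mutating the last element of a list)."""
--     if not tokens:
--         return ""
--     parts = []
--     pending = ""
--     for t in reversed(tokens[1:]):
--         if t in (".", ",", "!", "?"):
--             pending = t + pending
--         else:
--             parts.append(t + pending)
--             pending = ""
--     parts.append(tokens[0] + pending)
--     parts.reverse()
--     return " ".join(parts).replace(" - ", "-").capitalize()
-- ===== Notes on version B (the rewrite author's own statement) =====
-- stated objective: alternative
-- what changed: Replaces A's forward enumerate loop that mutates the last element of an accumulator list with a single right-to-left pass that carries a pending punctuation suffix and attaches it when a non-punctuation token is seen.
import Mathlib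
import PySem

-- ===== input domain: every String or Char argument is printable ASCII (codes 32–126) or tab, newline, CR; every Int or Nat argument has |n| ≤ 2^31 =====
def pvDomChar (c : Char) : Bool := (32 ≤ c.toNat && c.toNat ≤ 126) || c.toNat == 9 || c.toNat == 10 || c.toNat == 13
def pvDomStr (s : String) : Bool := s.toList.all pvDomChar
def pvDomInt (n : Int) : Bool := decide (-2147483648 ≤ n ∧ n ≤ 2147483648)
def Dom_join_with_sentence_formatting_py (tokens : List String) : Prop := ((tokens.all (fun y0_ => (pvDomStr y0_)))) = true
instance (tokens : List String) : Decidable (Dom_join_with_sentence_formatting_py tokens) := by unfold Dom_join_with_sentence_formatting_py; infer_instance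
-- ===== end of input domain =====

-- B replaces A's forward pass that mutates the last list element by a
-- right-to-left pass carrying a pending punctuation suffix (objective: alternative).

-- Python str.capitalize(), exact on the ASCII domain: first char uppercased, rest lowercased.
-- (Shared helper: both Pythons call the same built-in.)
def pyCapitalize (s : String) : String :=
  match s.toList with
  | [] => ""
  | c :: rest => String.ofList (PySem.Chars.upperChar c :: PySem.Chars.lower rest)

-- ===== PORT A =====
-- Python `updated_tokens[-1] += token`; the [] case is unreachable (guarded by i > 0).
def pyAppendLast (u : List String) (t : String) : List String :=
  match u with
  | [] => []
  | [x] => [x ++ t]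
  | x :: xs => x :: pyAppendLast xs t

def join_with_sentence_formatting_py (tokens : List String) : String :=
  let updated := (PySem.List.enumerate tokens).foldl
    (fun (u : List String) (p : Int × String) =>
      if 0 < p.1 ∧ p.2 ∈ ([".", ",", "!", "?"] : List String) then pyAppendLast u p.2
      else u ++ [p.2]) []
  pyCapitalize (PySem.Str.replace (PySem.Str.join " " updated) " - " "-")

-- ===== PORT B =====
def join_with_sentence_formatting_py_alt (tokens : List String) : String :=
  match tokens with
  | [] => ""
  | t0 :: ts =>
    let st := ts.reverse.foldl
      (fun (st : List String × String) (t : String) =>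
        if t = "." ∨ t = "," ∨ t = "!" ∨ t = "?" then (st.1, t ++ st.2)
        else (st.1 ++ [t ++ st.2], "")) (([], "") : List String × String)
    let parts := (st.1 ++ [t0 ++ st.2]).reverse
    pyCapitalize (PySem.Str.replace (PySem.Str.join " " parts) " - " "-")

-- ===== PRECONDITION & SPEC =====
def Spec_join_with_sentence_formatting_py (tokens : List String) (out : String) : Prop := out = join_with_sentence_formatting_py_alt tokens
instance (tokens : List String) (out : String) : Decidable (Spec_join_with_sentence_formatting_py tokens out) := by unfold Spec_join_with_sentence_formatting_py; infer_instance

-- ===== CLAIM (what is proved, stated in full; the proofs are below) =====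
def Claim_equal_join_with_sentence_formatting_py : Prop := ∀ (tokens : List String), Dom_join_with_sentence_formatting_py tokens → Spec_join_with_sentence_formatting_py tokens (join_with_sentence_formatting_py tokens)

-- ===== LEMMAS AND PROOFS =====

-- Reference combine: attach each run of punctuation tokens to the preceding token.
def bCombine (cur : String) : List String → List String
  | [] => [cur]
  | t :: ts =>
    if t = "." ∨ t = "," ∨ t = "!" ∨ t = "?" then bCombine (cur ++ t) ts
    else cur :: bCombine t ts

-- A's loop, indices stripped (all remaining indices are positive).
def fA (u : List String) : List String → List String
  | [] => u
  | t :: ts =>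
    if t = "." ∨ t = "," ∨ t = "!" ∨ t = "?" then fA (pyAppendLast u t) ts
    else fA (u ++ [t]) ts

theorem pyAppendLast_snoc (u : List String) (cur t : String) :
    pyAppendLast (u ++ [cur]) t = u ++ [cur ++ t] := by
  induction u with
  | nil => rfl
  | cons x xs ih =>
    cases xs with
    | nil => simp [pyAppendLast]
    | cons y ys => simpa [pyAppendLast] using ih

theorem enumFold (ts : List String) : ∀ (n : Int), 0 < n → ∀ (u : List String),
    (PySem.List.enumerate ts n).foldl
      (fun (u : List String) (p : Int × String) =>
        if 0 < p.1 ∧ p.2 ∈ ([".", ",", "!", "?"] : List String) then pyAppendLast u p.2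
        else u ++ [p.2]) u = fA u ts := by
  induction ts with
  | nil => intro n hn u; simp [PySem.List.enumerate_nil, fA]
  | cons t ts ih =>
    intro n hn u
    rw [PySem.List.enumerate_cons]
    by_cases h : t = "." ∨ t = "," ∨ t = "!" ∨ t = "?"
    · simp only [List.foldl_cons]
      rw [if_pos (by simpa [hn, List.mem_cons] using h)]
      rw [ih (n + 1) (by omega)]
      simp [fA, h]
    · simp only [List.foldl_cons]
      rw [if_neg (fun hc => h (by simpa [List.mem_cons] using hc.2))]
      rw [ih (n + 1) (by omega)]
      simp [fA, h]

theorem fA_eq_bCombine (ts : List String) : ∀ (u : List String) (cur : String),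
    fA (u ++ [cur]) ts = u ++ bCombine cur ts := by
  induction ts with
  | nil => intro u cur; simp [fA, bCombine]
  | cons t ts ih =>
    intro u cur
    by_cases h : t = "." ∨ t = "," ∨ t = "!" ∨ t = "?"
    · simp only [fA, bCombine, if_pos h, pyAppendLast_snoc]
      exact ih u (cur ++ t)
    · simp only [fA, bCombine, if_neg h]
      have := ih (u ++ [cur]) t
      simpa using this

theorem foldrB_eq (ts : List String) : ∀ (cur : String),
    (let st := ts.foldr
        (fun (t : String) (st : List String × String) =>
          if t = "." ∨ t = "," ∨ t = "!" ∨ t = "?" then (st.1, t ++ st.2)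
          else (st.1 ++ [t ++ st.2], "")) (([], "") : List String × String)
     st.1 ++ [cur ++ st.2]) = (bCombine cur ts).reverse := by
  induction ts with
  | nil => intro cur; simp [bCombine]
  | cons t ts ih =>
    intro cur
    by_cases h : t = "." ∨ t = "," ∨ t = "!" ∨ t = "?"
    · simp only [List.foldr_cons, if_pos h, bCombine]
      have := ih (cur ++ t)
      simpa [String.append_assoc] using this
    · simp only [List.foldr_cons, if_neg h, bCombine]
      have := ih t
      simp only at this
      simp [← this, List.reverse_cons]

-- ===== VERDICT (by name: the statement is the Claim_ definition above) =====
theorem join_with_sentence_formatting_py_spec : Claim_equal_join_with_sentence_formatting_py := by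
  intro tokens _
  unfold Spec_join_with_sentence_formatting_py
  cases tokens with
  | nil => decide
  | cons t0 ts =>
    unfold join_with_sentence_formatting_py join_with_sentence_formatting_py_alt
    simp only [PySem.List.enumerate_cons, List.foldl_cons, List.foldl_reverse]
    rw [if_neg (by simp)]
    rw [List.nil_append, show ((0:Int)+1) = 1 from rfl]
    rw [enumFold ts 1 (by omega) [t0]]
    have hA : fA ([t0]) ts = bCombine t0 ts := by
      simpa using fA_eq_bCombine ts [] t0
    have hB := foldrB_eq ts t0
    simp only at hB
    rw [hA]
    congr 1
    · congr 1
      congr 1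
      rw [hB, List.reverse_reverse]
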